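-- pv_equiv track=rewrite | github.com/ella00100/Python_basic | day05_calculate_fee3.py | calculate_fee3
-- ===== SOURCE A (Python) =====
-- def calculate_fee3(args):   #매개변수를 리스트로 받음
--     """
--     놀이공원 요금 계산 프로그램 vr.3
--     :param args: ages in list
--     :return: [total fee, adults, children]  #반환 값 리스트로
--     """
--     total_fee= 0
--     adults = 0
--     children = 0
--     for age in args:
--         if 19 <= age:
--             adults += 1
--             total_fee = total_fee + 10000
--         else:
--             children += 1
--             total_fee = total_fee + 3000
--     return dict(total_c=len(args), adult_c = adults, child_c =children, total_f = total_fee)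
-- ===== SOURCE B (Python) =====
-- def calculate_fee3(args):
--     s = sorted(args)
--     lo, hi = 0, len(s)
--     while lo < hi:
--         mid = (lo + hi) // 2
--         if s[mid] < 19:
--             lo = mid + 1
--         else:
--             hi = mid
--     adults = len(s) - lo
--     return dict(total_c=len(s), adult_c=adults, child_c=lo,
--                 total_f=adults * 10000 + lo * 3000)
-- ===== Notes on version B (the rewrite author's own statement) =====
-- stated objective: alternative
-- what changed: B sorts the ages and binary-searches for the adult/child boundary (first index with age >= 19), deriving both counts and the fee from that split point, instead of A's single pass with three running accumulators and a per-element branch.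
import Mathlib
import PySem

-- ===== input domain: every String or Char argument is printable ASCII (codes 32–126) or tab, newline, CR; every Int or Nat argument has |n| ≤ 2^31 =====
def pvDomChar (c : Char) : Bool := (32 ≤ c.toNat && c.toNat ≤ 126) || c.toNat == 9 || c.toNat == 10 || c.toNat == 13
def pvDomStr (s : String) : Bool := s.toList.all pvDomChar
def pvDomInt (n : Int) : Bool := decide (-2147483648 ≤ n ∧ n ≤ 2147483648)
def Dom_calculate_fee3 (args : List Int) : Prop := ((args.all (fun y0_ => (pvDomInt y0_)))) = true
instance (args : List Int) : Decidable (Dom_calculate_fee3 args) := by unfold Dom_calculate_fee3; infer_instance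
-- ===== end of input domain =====

-- B sorts the ages and binary-searches the adult/child boundary instead of A's accumulator loop (alternative algorithm).
-- ===== PORT A =====
def calculate_fee3 (args : List Int) : List (String × Int) :=
  let st := args.foldl
    (fun (st : Int × Int × Int) (age : Int) =>
      let (total_fee, adults, children) := st
      if 19 ≤ age then (total_fee + 10000, adults + 1, children)
      else (total_fee + 3000, adults, children + 1))
    (0, 0, 0)
  [("total_c", (args.length : Int)), ("adult_c", st.2.1), ("child_c", st.2.2), ("total_f", st.1)]

-- ===== PORT B =====
-- the while loop of Source B: binary search for the first index with s[idx] >= 19.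
-- lo, hi are always within 0..len s, so Python's s[mid] (in range) is exactly getD mid 0.
def pvBsearch (s : List Int) (lo hi : Nat) : Nat :=
  if lo < hi then
    let mid := (lo + hi) / 2
    if s.getD mid 0 < 19 then pvBsearch s (mid + 1) hi else pvBsearch s lo mid
  else lo
termination_by hi - lo
decreasing_by all_goals omega

def calculate_fee3_alt (args : List Int) : List (String × Int) :=
  let s := PySem.List.sorted args (fun x => x) false
  let lo := pvBsearch s 0 s.length
  let adults : Int := (s.length : Int) - (lo : Int)
  [("total_c", (s.length : Int)), ("adult_c", adults), ("child_c", (lo : Int)),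
   ("total_f", adults * 10000 + (lo : Int) * 3000)]

-- ===== PRECONDITION & SPEC =====
def Spec_calculate_fee3 (args : List Int) (out : List (String × Int)) : Prop := out = calculate_fee3_alt args
instance (args : List Int) (out : List (String × Int)) : Decidable (Spec_calculate_fee3 args out) := by unfold Spec_calculate_fee3; infer_instance

-- ===== CLAIM =====
def Claim_equal_calculate_fee3 : Prop := ∀ (args : List Int), Dom_calculate_fee3 args → Spec_calculate_fee3 args (calculate_fee3 args)

-- ===== LEMMAS AND PROOFS =====
-- A's fold computes the counts and the fee in closed form.
theorem calc_fold (args : List Int) (f a c : Int) :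
    args.foldl
      (fun (st : Int × Int × Int) (age : Int) =>
        let (total_fee, adults, children) := st
        if 19 ≤ age then (total_fee + 10000, adults + 1, children)
        else (total_fee + 3000, adults, children + 1))
      (f, a, c)
    = (f + (args.countP (fun age => 19 ≤ age) : Nat) * 10000
         + ((args.length : Int) - (args.countP (fun age => 19 ≤ age) : Nat)) * 3000,
       a + (args.countP (fun age => 19 ≤ age) : Nat),
       c + ((args.length : Int) - (args.countP (fun age => 19 ≤ age) : Nat))) := by
  induction args generalizing f a c with
  | nil => simp
  | cons x xs ih =>
    simp only [List.foldl_cons, List.countP_cons, List.length_cons]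
    by_cases h : 19 ≤ x
    · rw [if_pos h, ih]
      simp only [h, decide_true]
      push_cast
      refine Prod.ext ?_ (Prod.ext ?_ ?_) <;> simp <;> ring
    · rw [if_neg h, ih]
      simp only [h, decide_false]
      push_cast
      refine Prod.ext ?_ (Prod.ext ?_ ?_) <;> simp <;> ring

-- In a sorted list, position i holds a value < 19 exactly when i is below the count of values < 19.
theorem sorted_getD_lt_iff (s : List Int) (hs : s.Pairwise (· ≤ ·)) (i : Nat) (hi : i < s.length) :
    (s.getD i 0 < 19 ↔ i < s.countP (fun a => a < 19)) := by
  induction s generalizing i with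
  | nil => simp at hi
  | cons x xs ih =>
    rcases List.pairwise_cons.mp hs with ⟨hx, hxs⟩
    cases i with
    | zero =>
      simp only [List.getD_cons_zero, List.countP_cons]
      by_cases h : x < 19
      · simp [h]
      · constructor
        · intro h'; exact absurd h' h
        · intro h'
          have hz : xs.countP (fun a => decide (a < 19)) = 0 := by
            apply List.countP_eq_zero.mpr
            intro y hy
            simp only [decide_eq_true_eq]
            have := hx y hy
            omega
          simp [h, hz] at h'
    | succ j =>
      simp only [List.getD_cons_succ, List.countP_cons]
      have hj : j < xs.length := by simpa using hi
      rw [ih hxs j hj]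
      by_cases h : x < 19
      · simp [h]
      · have hz : xs.countP (fun a => decide (a < 19)) = 0 := by
          apply List.countP_eq_zero.mpr
          intro y hy
          simp only [decide_eq_true_eq]
          have := hx y hy
          omega
        simp [h, hz]

-- The binary search returns the boundary count whenever it is bracketed by lo..hi.
theorem bsearch_eq (s : List Int) (hs : s.Pairwise (· ≤ ·)) :
    ∀ lo hi : Nat, lo ≤ s.countP (fun a => a < 19) → s.countP (fun a => a < 19) ≤ hi →
    hi ≤ s.length → pvBsearch s lo hi = s.countP (fun a => a < 19) := by
  intro lo hi
  induction lo, hi using pvBsearch.induct s with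
  | case1 lo hi hlt mid hm ih =>
    intro h1 h2 h3
    have hmid : mid = (lo + hi) / 2 := rfl
    rw [pvBsearch]
    simp only [if_pos hlt]
    rw [← hmid, if_pos hm]
    have hlo : mid < s.countP (fun a => a < 19) :=
      (sorted_getD_lt_iff s hs mid (by omega)).mp hm
    exact ih (by omega) h2 h3
  | case2 lo hi hlt mid hm ih =>
    intro h1 h2 h3
    have hmid : mid = (lo + hi) / 2 := rfl
    rw [pvBsearch]
    simp only [if_pos hlt]
    rw [← hmid, if_neg hm]
    have hhi : ¬ (mid < s.countP (fun a => a < 19)) :=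
      fun hc => hm ((sorted_getD_lt_iff s hs mid (by omega)).mpr hc)
    exact ih h1 (by omega) (by omega)
  | case3 lo hi hlt =>
    intro h1 h2 _
    rw [pvBsearch]
    simp only [if_neg hlt]
    omega

-- countP splits the length at the 19 boundary.
theorem count_split (args : List Int) :
    args.countP (fun a => decide (a < 19)) + args.countP (fun a => decide (19 ≤ a)) = args.length := by
  induction args with
  | nil => simp
  | cons x xs ih =>
    simp only [List.countP_cons, List.length_cons]
    by_cases h : x < 19
    · simp [h, show ¬ (19 ≤ x) by omega]; omega
    · simp [h, show (19 ≤ x) by omega]; omega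

-- ===== VERDICT =====
theorem calculate_fee3_spec : Claim_equal_calculate_fee3 := by
  intro args _
  unfold Spec_calculate_fee3 calculate_fee3 calculate_fee3_alt
  rw [calc_fold]
  have hperm := PySem.List.sorted_perm (xs := args) (key := fun x : Int => x) (rev := false)
  have hpair : (PySem.List.sorted args (fun x : Int => x) false).Pairwise (· ≤ ·) := by
    simpa using PySem.List.sorted_pairwise (xs := args) (key := fun x : Int => x)
  have hlen := hperm.length_eq
  have hcnt := hperm.countP_eq (fun a => decide (a < 19))
  have hbs := bsearch_eq (PySem.List.sorted args (fun x : Int => x) false) hpair 0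
      (PySem.List.sorted args (fun x : Int => x) false).length
      (Nat.zero_le _) List.countP_le_length (le_refl _)
  have hsum := count_split args
  simp only [hbs]
  simp only [hcnt]
  simp only [hlen]
  simp only [List.cons.injEq, Prod.mk.injEq, true_and, and_true]
  refine ⟨?_, ?_, ?_⟩ <;> push_cast <;> omega
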